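-- pv_equiv track=rewrite | github.com/Wilfred/proper-compiler-hat | compiler.py | elf_header_instructions
-- ===== SOURCE A (Python) =====
-- ENTRY_POINT = 0x400000
--
-- def int_64bit(num):
--     """Return `num` as a list of bytes of its 64-bit representation.
--
--     """
--     assert num >= 0, "Signed numbers are not supported"
--     return list(num.to_bytes(8, 'little'))
--
-- def num_bytes(byte_tmpl):
--     """Given a list of raw bytes and template strings, calculate the total number
--     of bytes that the final output will have.
--
--     Assumes all template strings are replaced by 8 bytes.
--
--     >>> num_bytes([0x127, "prog_bytes"])
--     9
--
--     """
--     total = 0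
--     for b in byte_tmpl:
--         if isinstance(b, int):
--             total += 1
--         elif isinstance(b, list) and b:
--             tmpl_key = b[0]
--             if tmpl_key == 'string_lit':
--                 total += 8
--             elif tmpl_key == 'fun_offset':
--                 total += 4
--             else:
--                 assert False, "tmpl key: {!r}".format(tmpl_key)
--         elif b in ('prog_entry', 'prog_length'):
--             total += 8
--         else:
--             assert False, "tmpl: {!r}".format(b)
--
--     return total
--
-- def elf_header_instructions(funs_instrs, string_literals):
--     # The raw bytes of the ELF header. We use strings
--     # for placeholder values computed later.
--     header_tmpl = [
--         0x7f, 0x45, 0x4c, 0x46, 0x02, 0x01, 0x01, 0x00, # ELF magic number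
--         0x00, 0x00, 0x00, 0x00, 0x00, 0x00, 0x00, 0x00, # ELF reserved
--
--         0x02, 0x00, # e_type: Executable file
--         0x3e, 0x00, # e_machine: AMD64
--         0x01, 0x00, 0x00, 0x00, # e_version: 1
--         'prog_entry', # e_entry (program entry address, load offset + header size)
--         0x40, 0x00, 0x00, 0x00, 0x00, 0x00, 0x00, 0x00, # e_phoff (program header offset, 0x40)
--         0x00, 0x00, 0x00, 0x00, 0x00, 0x00, 0x00, 0x00, # e_shoff (no section headers)
--
--         0x00, 0x00, 0x00, 0x00, # e_flags (no flags)
--         0x40, 0x00, # e_ehsize (ELF header size, 0x40)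
--         0x38, 0x00, # e_phentsize (program header size)
--         0x01, 0x00, # e_phnum
--         0x00, 0x00, # e_shentsize
--         0x00, 0x00, # e_shnum
--         0x00, 0x00, # e_shstrndx
--
--         0x01, 0x00, 0x00, 0x00, # p_type (loadable segment)
--         0x05, 0x00, 0x00, 0x00, # p_flags (read and execute)
--         0x00, 0x00, 0x00, 0x00, 0x00, 0x00, 0x00, 0x00, # p_offset
--         0x00, 0x00, 0x40, 0x00, 0x00, 0x00, 0x00, 0x00, # p_vaddr (start of current section)
--         0x00, 0x00, 0x40, 0x00, 0x00, 0x00, 0x00, 0x00, # p_paddr (start of current section)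
--         'prog_length', # p_filesz, the file size (8 bytes)
--         'prog_length', # p_memsz, the file size (8 bytes)
--         0x00, 0x00, 0x20, 0x00, 0x00, 0x00, 0x00, 0x00, # p_align
--     ]
--
--     rodata_size = sum(num_bytes_string_lit(lit) for lit in string_literals)
--     prog_length = num_bytes(header_tmpl) + len(funs_instrs) + rodata_size
--
--     result = []
--     for byte in header_tmpl:
--         if isinstance(byte, int):
--             result.append(byte)
--         elif byte == 'prog_length':
--             result.extend(int_64bit(prog_length))
--         elif byte == 'prog_entry':
--             result.extend(int_64bit(ENTRY_POINT + num_bytes(header_tmpl)))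
--         else:
--             assert False, "Invalid byte in header: {!r}".format(byte)
--
--     return result
--
-- def num_bytes_string_lit(value):
--     # String literals are stored as:
--     # * a 64-bit number representing the length
--     # * the data itself
--     # * a null byte for convenient linux interop
--     return 8 + len(value) + 1
-- ===== SOURCE B (Python) =====
-- ENTRY_POINT = 0x400000
--
-- def int_64bit(num):
--     """Return `num` as a list of bytes of its 64-bit representation."""
--     assert num >= 0, "Signed numbers are not supported"
--     return list(num.to_bytes(8, 'little'))
--
-- def elf_header_instructions(funs_instrs, string_literals):
--     # ELF header template: ints are emitted as-is, strings name 8-byte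
--     # placeholder fields that are patched in place after the emit pass.
--     header_tmpl = [
--         0x7f, 0x45, 0x4c, 0x46, 0x02, 0x01, 0x01, 0x00, # ELF magic number
--         0x00, 0x00, 0x00, 0x00, 0x00, 0x00, 0x00, 0x00, # ELF reserved
--         0x02, 0x00, # e_type: Executable file
--         0x3e, 0x00, # e_machine: AMD64
--         0x01, 0x00, 0x00, 0x00, # e_version: 1
--         'prog_entry', # e_entry
--         0x40, 0x00, 0x00, 0x00, 0x00, 0x00, 0x00, 0x00, # e_phoff
--         0x00, 0x00, 0x00, 0x00, 0x00, 0x00, 0x00, 0x00, # e_shoff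
--         0x00, 0x00, 0x00, 0x00, # e_flags
--         0x40, 0x00, # e_ehsize
--         0x38, 0x00, # e_phentsize
--         0x01, 0x00, # e_phnum
--         0x00, 0x00, # e_shentsize
--         0x00, 0x00, # e_shnum
--         0x00, 0x00, # e_shstrndx
--         0x01, 0x00, 0x00, 0x00, # p_type
--         0x05, 0x00, 0x00, 0x00, # p_flags
--         0x00, 0x00, 0x00, 0x00, 0x00, 0x00, 0x00, 0x00, # p_offset
--         0x00, 0x00, 0x40, 0x00, 0x00, 0x00, 0x00, 0x00, # p_vaddr
--         0x00, 0x00, 0x40, 0x00, 0x00, 0x00, 0x00, 0x00, # p_paddr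
--         'prog_length', # p_filesz
--         'prog_length', # p_memsz
--         0x00, 0x00, 0x20, 0x00, 0x00, 0x00, 0x00, 0x00, # p_align
--     ]
--
--     # Single emit pass: literals are appended; each placeholder records its
--     # byte offset and reserves eight zero bytes (like a relocation slot).
--     result = []
--     slots = []
--     for item in header_tmpl:
--         if isinstance(item, int):
--             result.append(item)
--         else:
--             slots.append((len(result), item))
--             result.extend([0] * 8)
--
--     header_size = len(result)
--     rodata_size = sum(8 + len(lit) + 1 for lit in string_literals)
--     values = {
--         'prog_entry': ENTRY_POINT + header_size,
--         'prog_length': header_size + len(funs_instrs) + rodata_size,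
--     }
--
--     # Patch pass: overwrite each recorded 8-byte slot in place.
--     for offset, key in slots:
--         result[offset:offset + 8] = int_64bit(values[key])
--     return result
-- ===== Notes on version B (the rewrite author's own statement) =====
-- stated objective: alternative
-- what changed: Replaces A's separate num_bytes classification pass and per-placeholder re-computation with a single emit pass that records each placeholder's byte offset and reserves 8 zero bytes, then patches the recorded slots in place (assembler-style relocation); the header size falls out as len(result).
import Mathlib
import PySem

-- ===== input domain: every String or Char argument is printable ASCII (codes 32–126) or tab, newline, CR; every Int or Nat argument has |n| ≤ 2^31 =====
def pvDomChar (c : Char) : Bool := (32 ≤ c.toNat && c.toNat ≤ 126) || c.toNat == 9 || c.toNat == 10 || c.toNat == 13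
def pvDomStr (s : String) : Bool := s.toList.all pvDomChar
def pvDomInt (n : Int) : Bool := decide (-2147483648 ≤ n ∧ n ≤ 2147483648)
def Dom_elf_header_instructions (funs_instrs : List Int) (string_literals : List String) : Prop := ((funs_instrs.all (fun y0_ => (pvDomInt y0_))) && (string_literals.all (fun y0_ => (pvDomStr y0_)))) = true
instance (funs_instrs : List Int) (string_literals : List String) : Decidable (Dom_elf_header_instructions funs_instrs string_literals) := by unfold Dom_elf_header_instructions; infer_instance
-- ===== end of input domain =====

-- B rebuilds the header in one emit pass that records placeholder offsets and then patches
-- the 8-byte slots in place (assembler-style relocation), instead of A's separate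
-- num_bytes classification pass; objective: alternative decomposition, same output bytes.

-- Shared data/helpers (identical literals in both Python sources):
-- the header template (ints, and strings naming 8-byte placeholder fields) …
def pvHeaderTmpl : List (Int ⊕ String) := [
    Sum.inl 127, Sum.inl 69, Sum.inl 76, Sum.inl 70, Sum.inl 2, Sum.inl 1, Sum.inl 1, Sum.inl 0,
    Sum.inl 0, Sum.inl 0, Sum.inl 0, Sum.inl 0, Sum.inl 0, Sum.inl 0, Sum.inl 0, Sum.inl 0,
    Sum.inl 2, Sum.inl 0, Sum.inl 62, Sum.inl 0, Sum.inl 1, Sum.inl 0, Sum.inl 0, Sum.inl 0,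
    Sum.inr "prog_entry", Sum.inl 64, Sum.inl 0, Sum.inl 0, Sum.inl 0, Sum.inl 0, Sum.inl 0, Sum.inl 0,
    Sum.inl 0, Sum.inl 0, Sum.inl 0, Sum.inl 0, Sum.inl 0, Sum.inl 0, Sum.inl 0, Sum.inl 0,
    Sum.inl 0, Sum.inl 0, Sum.inl 0, Sum.inl 0, Sum.inl 0, Sum.inl 64, Sum.inl 0, Sum.inl 56,
    Sum.inl 0, Sum.inl 1, Sum.inl 0, Sum.inl 0, Sum.inl 0, Sum.inl 0, Sum.inl 0, Sum.inl 0,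
    Sum.inl 0, Sum.inl 1, Sum.inl 0, Sum.inl 0, Sum.inl 0, Sum.inl 5, Sum.inl 0, Sum.inl 0,
    Sum.inl 0, Sum.inl 0, Sum.inl 0, Sum.inl 0, Sum.inl 0, Sum.inl 0, Sum.inl 0, Sum.inl 0,
    Sum.inl 0, Sum.inl 0, Sum.inl 0, Sum.inl 64, Sum.inl 0, Sum.inl 0, Sum.inl 0, Sum.inl 0,
    Sum.inl 0, Sum.inl 0, Sum.inl 0, Sum.inl 64, Sum.inl 0, Sum.inl 0, Sum.inl 0, Sum.inl 0,
    Sum.inl 0, Sum.inr "prog_length", Sum.inr "prog_length", Sum.inl 0, Sum.inl 0, Sum.inl 32, Sum.inl 0, Sum.inl 0,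
    Sum.inl 0, Sum.inl 0, Sum.inl 0]

def pvENTRY_POINT : Int := 4194304  -- ENTRY_POINT = 0x400000

-- int_64bit: num.to_bytes(8, 'little') — byte k is (num // 256^k) % 256; exact for 0 ≤ num < 2^64
-- (Python raises outside that range; unreachable for the values this header computes).
def pvInt64 (n : Int) : List Int :=
  [PySem.Int.mod n 256,
   PySem.Int.mod (PySem.Int.floordiv n 256) 256,
   PySem.Int.mod (PySem.Int.floordiv n 65536) 256,
   PySem.Int.mod (PySem.Int.floordiv n 16777216) 256,
   PySem.Int.mod (PySem.Int.floordiv n 4294967296) 256,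
   PySem.Int.mod (PySem.Int.floordiv n 1099511627776) 256,
   PySem.Int.mod (PySem.Int.floordiv n 281474976710656) 256,
   PySem.Int.mod (PySem.Int.floordiv n 72057594037927936) 256]

-- ===== PORT A =====
-- num_bytes: +1 per raw byte, +8 per template string (the list-template branch of A
-- never occurs in this header template, so it has no counterpart here).
def pvNumBytes (byte_tmpl : List (Int ⊕ String)) : Int :=
  byte_tmpl.foldl (fun total b =>
    match b with
    | Sum.inl _ => total + 1
    | Sum.inr _ => total + 8) 0

def pvNumBytesStringLit (value : String) : Int := 8 + PySem.Str.len value + 1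

def elf_header_instructions (funs_instrs : List Int) (string_literals : List String) : List Int :=
  let rodata_size := (string_literals.map (fun lit => pvNumBytesStringLit lit)).sum
  let prog_length := pvNumBytes pvHeaderTmpl + (funs_instrs.length : Int) + rodata_size
  pvHeaderTmpl.foldl (fun result byte =>
    match byte with
    | Sum.inl n => result ++ [n]
    | Sum.inr s =>
        if s = "prog_length" then result ++ pvInt64 prog_length
        else if s = "prog_entry" then result ++ pvInt64 (pvENTRY_POINT + pvNumBytes pvHeaderTmpl)
        else result) []  -- final branch: assert False, unreachable for this template

-- ===== PORT B =====
-- emit pass: append literals; for a placeholder record (offset, key) and reserve 8 zero bytes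
def pvEmitPass (tmpl : List (Int ⊕ String)) : List Int × List (Nat × String) :=
  tmpl.foldl (fun st item =>
    match item with
    | Sum.inl n => (st.1 ++ [n], st.2)
    | Sum.inr key => (st.1 ++ List.replicate 8 0, st.2 ++ [(st.1.length, key)])) ([], [])

-- result[offset:offset+8] = int_64bit(v): in-range 8-for-8 slice assignment
def pvPatchSlot (result : List Int) (offset : Nat) (v : Int) : List Int :=
  result.take offset ++ pvInt64 v ++ result.drop (offset + 8)

def elf_header_instructions_alt (funs_instrs : List Int) (string_literals : List String) : List Int :=
  let pass := pvEmitPass pvHeaderTmpl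
  let header_size : Int := pass.1.length
  let rodata_size := (string_literals.map (fun lit => 8 + PySem.Str.len lit + 1)).sum
  -- the dict literal {'prog_entry': …, 'prog_length': …} = sequential inserts into an empty dict
  let values : PySem.Dict String Int :=
    (PySem.Dict.empty.insert "prog_entry" (pvENTRY_POINT + header_size)).insert
      "prog_length" (header_size + (funs_instrs.length : Int) + rodata_size)
  pass.2.foldl (fun result slot => pvPatchSlot result slot.1 (values.getD slot.2 0)) pass.1

-- ===== PRECONDITION & SPEC =====
def Spec_elf_header_instructions (funs_instrs : List Int) (string_literals : List String) (out : List Int) : Prop := out = elf_header_instructions_alt funs_instrs string_literals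
instance (funs_instrs : List Int) (string_literals : List String) (out : List Int) : Decidable (Spec_elf_header_instructions funs_instrs string_literals out) := by unfold Spec_elf_header_instructions; infer_instance

-- ===== CLAIM (what is proved, stated in full; the proofs are below) =====
def Claim_equal_elf_header_instructions : Prop := ∀ (funs_instrs : List Int) (string_literals : List String), Dom_elf_header_instructions funs_instrs string_literals → Spec_elf_header_instructions funs_instrs string_literals (elf_header_instructions funs_instrs string_literals)

-- ===== LEMMAS AND PROOFS =====

-- ===== VERDICT (by name: the statement is the Claim_ definition above) =====
set_option maxRecDepth 8000 in
set_option maxHeartbeats 2000000 in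
theorem elf_header_instructions_spec : Claim_equal_elf_header_instructions := by
  intro funs_instrs string_literals _
  show elf_header_instructions funs_instrs string_literals = elf_header_instructions_alt funs_instrs string_literals
  simp only [elf_header_instructions, elf_header_instructions_alt, pvHeaderTmpl, pvNumBytes,
        pvEmitPass, pvPatchSlot, pvNumBytesStringLit, pvENTRY_POINT, pvInt64,
        List.foldl_cons, List.foldl_nil, List.replicate, List.nil_append,
        List.cons_append, List.take, List.drop, List.length_cons, List.length_nil,
        String.reduceEq, reduceIte, PySem.Dict.getD_insert, PySem.Dict.getD_empty,
        Nat.reduceAdd, Nat.cast_ofNat, Int.reduceAdd]
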